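-- pv_equiv track=rewrite | github.com/ids-infotech/corsearch_project | application_and_logos_screenshots_bhutan.py | merge_duplicate_pages_for_application_screenshots_bhutan
-- ===== SOURCE A (Python) =====
-- def merge_duplicate_pages_for_application_screenshots_bhutan(content_data):
--     # Create a dictionary to store consolidated texts
--     consolidated_data = {}
--
--     for entry in content_data:
--         page_num = entry["text_on_page"]
--         text = entry["text"].strip()  # Remove any leading/trailing white spaces
--
--         # Skip the entry if the text is empty
--         if not text:
--             continue
--
--         if page_num not in consolidated_data:
--             consolidated_data[page_num] = text
--         else:
--             # Add a space before appending the next text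
--             consolidated_data[page_num] += " " + text
--
--     # Convert the consolidated data dictionary back to a list format
--     merged_data = [{"text_on_page": k, "text": v} for k, v in consolidated_data.items()]
--
--     # Optionally, sort the list by 'text_on_page' if needed
--     merged_data.sort(key=lambda x: x["text_on_page"])
--
--     return merged_data
-- ===== SOURCE B (Python) =====
-- def merge_duplicate_pages_for_application_screenshots_bhutan(content_data):
--     # Sort the distinct pages that carry any non-empty text, then collect each
--     # page's stripped texts in one scan per page -- no dict accumulator, no final sort.
--     pages = sorted({e["text_on_page"] for e in content_data if e["text"].strip()})
--     return [
--         {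
--             "text_on_page": p,
--             "text": " ".join(
--                 e["text"].strip()
--                 for e in content_data
--                 if e["text_on_page"] == p and e["text"].strip()
--             ),
--         }
--         for p in pages
--     ]
-- ===== Notes on version B (the rewrite author's own statement) =====
-- stated objective: alternative
-- what changed: B replaces A's dict-accumulate-then-sort with sorting the distinct pages first and then collecting each page's stripped non-empty texts with one join per page; no dict and no trailing sort of the merged list.
import Mathlib
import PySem

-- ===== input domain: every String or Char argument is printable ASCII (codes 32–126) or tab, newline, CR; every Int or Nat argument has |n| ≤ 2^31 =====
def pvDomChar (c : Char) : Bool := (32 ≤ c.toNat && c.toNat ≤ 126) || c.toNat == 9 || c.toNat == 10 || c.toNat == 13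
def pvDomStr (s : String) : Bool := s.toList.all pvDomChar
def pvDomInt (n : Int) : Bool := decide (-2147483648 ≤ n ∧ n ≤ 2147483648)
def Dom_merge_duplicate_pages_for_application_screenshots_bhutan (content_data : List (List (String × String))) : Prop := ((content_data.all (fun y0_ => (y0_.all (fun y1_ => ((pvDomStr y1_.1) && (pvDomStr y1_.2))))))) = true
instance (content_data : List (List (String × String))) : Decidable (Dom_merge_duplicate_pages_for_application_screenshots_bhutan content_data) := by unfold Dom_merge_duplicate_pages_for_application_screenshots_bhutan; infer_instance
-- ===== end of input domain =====

-- B sorts the distinct pages first and joins each page's stripped non-empty texts in one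
-- scan per page, instead of A's dict accumulation followed by a sort (alternative decomposition).


-- ===== PORT A =====
-- entry["text_on_page"] / entry["text"]: a missing key raises KeyError in Python and is
-- excluded by Pre_; the getD default "" is never reached on admitted inputs.
def pvPage (e : List (String × String)) : String :=
  PySem.Dict.getD (PySem.Dict.mk e) "text_on_page" ""

def pvText (e : List (String × String)) : String :=
  PySem.Str.strip (PySem.Dict.getD (PySem.Dict.mk e) "text" "")

-- the body of A's for-loop: skip empty text, then insert or append into the dict
def pvAStep (d : PySem.Dict String String) (e : List (String × String)) : PySem.Dict String String :=
  let page_num := pvPage e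
  let text := pvText e
  if text = "" then d
  else
    match PySem.Dict.get? d page_num with
    | none => PySem.Dict.insert d page_num text
    | some v => PySem.Dict.insert d page_num (v ++ " " ++ text)

def merge_duplicate_pages_for_application_screenshots_bhutan (content_data : List (List (String × String))) : List (List (String × String)) :=
  let consolidated_data := content_data.foldl pvAStep PySem.Dict.empty
  let merged_data := consolidated_data.items.map (fun kv => [("text_on_page", kv.1), ("text", kv.2)])
  PySem.List.sorted merged_data (fun x => PySem.Dict.getD (PySem.Dict.mk x) "text_on_page" "") false

-- ===== PORT B =====
-- sorted({e["text_on_page"] for e in content_data if e["text"].strip()})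
def pvBPages (content_data : List (List (String × String))) : List String :=
  PySem.List.sorted
    (PySem.Set.ofList ((content_data.filter (fun e => decide (pvText e ≠ ""))).map pvPage))
    (fun x => x) false

def merge_duplicate_pages_for_application_screenshots_bhutan_alt (content_data : List (List (String × String))) : List (List (String × String)) :=
  (pvBPages content_data).map (fun p =>
    [("text_on_page", p),
     ("text", PySem.Str.join " "
        ((content_data.filter (fun e => decide (pvPage e = p ∧ pvText e ≠ ""))).map pvText))])

-- ===== PRECONDITION & SPEC =====
-- Pre_ excludes exactly the inputs where Python A raises KeyError: an entry missing
-- the "text_on_page" or the "text" key.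
def Pre_merge_duplicate_pages_for_application_screenshots_bhutan (content_data : List (List (String × String))) : Prop :=
  ∀ e ∈ content_data,
    (PySem.Dict.mk e).contains "text_on_page" = true ∧ (PySem.Dict.mk e).contains "text" = true
instance (content_data : List (List (String × String))) : Decidable (Pre_merge_duplicate_pages_for_application_screenshots_bhutan content_data) := by unfold Pre_merge_duplicate_pages_for_application_screenshots_bhutan; infer_instance

def pvWitness_merge_duplicate_pages_for_application_screenshots_bhutan : (List (List (String × String))) :=
  [[("text_on_page", "1"), ("text", " a ")],
   [("text_on_page", "2"), ("text", "")],
   [("text_on_page", "1"), ("text", "b")]]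

def Spec_merge_duplicate_pages_for_application_screenshots_bhutan (content_data : List (List (String × String))) (out : List (List (String × String))) : Prop := out = merge_duplicate_pages_for_application_screenshots_bhutan_alt content_data
instance (content_data : List (List (String × String))) (out : List (List (String × String))) : Decidable (Spec_merge_duplicate_pages_for_application_screenshots_bhutan content_data out) := by unfold Spec_merge_duplicate_pages_for_application_screenshots_bhutan; infer_instance

-- ===== CLAIM (what is proved, stated in full; the proofs are below) =====
def Claim_equal_merge_duplicate_pages_for_application_screenshots_bhutan : Prop := ∀ (content_data : List (List (String × String))), Dom_merge_duplicate_pages_for_application_screenshots_bhutan content_data → Pre_merge_duplicate_pages_for_application_screenshots_bhutan content_data → Spec_merge_duplicate_pages_for_application_screenshots_bhutan content_data (merge_duplicate_pages_for_application_screenshots_bhutan content_data)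

-- ===== LEMMAS AND PROOFS =====

-- entries with non-empty stripped text, in order (what both programs actually consume)
def pvL (c : List (List (String × String))) : List (List (String × String)) :=
  c.filter (fun e => decide (pvText e ≠ ""))

-- the texts of page p among l, in order
def pvJT (l : List (List (String × String))) (p : String) : List String :=
  (l.filter (fun e => pvPage e == p)).map pvText

-- A's incremental "v + ' ' + t" catenation of a page's texts
def pvCat : List String → String
  | [] => ""
  | t :: ts => ts.foldl (fun a b => a ++ " " ++ b) t

lemma pvCat_append (ts : List String) (t : String) :
    pvCat (ts ++ [t]) = if ts = [] then t else pvCat ts ++ " " ++ t := by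
  cases ts with
  | nil => rfl
  | cons h u => simp [pvCat, List.foldl_append]

lemma pvJoinPrefix (sep x y : List Char) (ts : List (List Char)) :
    PySem.Chars.join sep ((x ++ y) :: ts) = x ++ PySem.Chars.join sep (y :: ts) := by
  cases ts with
  | nil => simp [PySem.Chars.join_singleton]
  | cons u us => simp [PySem.Chars.join_cons_cons, List.append_assoc]

lemma pvFoldlJoin (sep : List Char) (ts : List (List Char)) :
    ∀ a, ts.foldl (fun u v => u ++ sep ++ v) a = PySem.Chars.join sep (a :: ts) := by
  induction ts with
  | nil => intro a; simp [PySem.Chars.join_singleton]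
  | cons t ts ih =>
    intro a
    simp only [List.foldl_cons]
    rw [ih, PySem.Chars.join_cons_cons, show a ++ sep ++ t = (a ++ sep) ++ t from by simp,
        pvJoinPrefix, List.append_assoc]

lemma pvToListFoldl (ts : List String) :
    ∀ a : String, (ts.foldl (fun x y => x ++ " " ++ y) a).toList
      = (ts.map String.toList).foldl (fun u v => u ++ " ".toList ++ v) a.toList := by
  induction ts with
  | nil => intro a; rfl
  | cons t ts ih =>
    intro a
    simp only [List.foldl_cons, List.map_cons]
    rw [ih]
    congr 1
    simp [String.toList_append]

lemma pvJoin_eq_pvCat (ts : List String) : PySem.Str.join " " ts = pvCat ts := by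
  cases ts with
  | nil => rfl
  | cons t ts =>
    apply String.toList_inj.mp
    rw [PySem.Str.toList_join]
    simp only [List.map_cons, pvCat]
    rw [pvToListFoldl, pvFoldlJoin]

lemma pvA_foldl_filter (c : List (List (String × String))) :
    ∀ d, c.foldl pvAStep d = (pvL c).foldl pvAStep d := by
  induction c with
  | nil => intro d; rfl
  | cons e c ih =>
    intro d
    by_cases h : pvText e = ""
    · simp [pvL, h, pvAStep, ih d]
    · simp only [pvL, List.filter_cons]
      simp only [pvL] at ih
      rw [if_pos (by simpa using h), List.foldl_cons]
      exact ih _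

lemma pvFindSelf (l : List String) (x : String) (h : x ∈ l) :
    l.find? (fun y => y == x) = some x := by
  induction l with
  | nil => cases h
  | cons y l ih =>
    by_cases hy : y = x
    · rw [List.find?_cons_of_pos (by simp [hy])]
      exact congrArg some hy
    · have hx : x ∈ l := by cases h with | head => exact absurd rfl hy | tail _ h' => exact h'
      rw [List.find?_cons_of_neg (by simp [hy])]
      exact ih hx

lemma pvFindNone (l : List String) (x : String) (h : x ∉ l) :
    l.find? (fun y => y == x) = none := by
  apply List.find?_eq_none.mpr
  intro y hy
  simp only [beq_iff_eq]
  rintro rfl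
  exact h hy

lemma pvJT_eq_nil (l : List (List (String × String))) (x : String) (h : x ∉ l.map pvPage) :
    pvJT l x = [] := by
  unfold pvJT
  rw [List.filter_eq_nil_iff.mpr, List.map_nil]
  intro e he
  simp only [beq_iff_eq]
  intro hx
  exact h (List.mem_map.mpr ⟨e, he, hx⟩)

lemma pvJT_ne_nil (l : List (List (String × String))) (x : String) (h : x ∈ l.map pvPage) :
    pvJT l x ≠ [] := by
  unfold pvJT
  obtain ⟨e, he, hx⟩ := List.mem_map.mp h
  intro hnil
  have : e ∈ (l.filter (fun e => pvPage e == x)) := List.mem_filter.mpr ⟨he, by simp [hx]⟩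
  rw [List.map_eq_nil_iff.mp hnil] at this
  cases this

set_option maxHeartbeats 1000000 in
lemma pvA_items (l : List (List (String × String))) (hl : ∀ e ∈ l, pvText e ≠ "") :
    (l.foldl pvAStep PySem.Dict.empty).items
      = (PySem.Set.ofList (l.map pvPage)).map
          (fun p => (p, pvCat (pvJT l p))) := by
  induction l using List.reverseRecOn with
  | nil => rfl
  | append_singleton M e ih =>
    have hM : ∀ e' ∈ M, pvText e' ≠ "" := fun e' h' => hl e' (List.mem_append_left _ h')
    have he : pvText e ≠ "" := hl e (List.mem_append_right _ (List.mem_singleton.mpr rfl))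
    have hitems := ih hM
    set d := M.foldl pvAStep PySem.Dict.empty with hd
    set S := PySem.Set.ofList (M.map pvPage) with hS
    set x := pvPage e with hx
    have hget : d.get? x
        = (S.find? (fun y => y == x)).map (fun p => pvCat (pvJT M p)) := by
      show Option.map (fun q => q.2) (d.items.find? (fun q => q.1 == x)) = _
      rw [hitems, List.find?_map, Option.map_map]
      rfl
    have hcontains : d.contains x = decide (x ∈ S) := by
      show (d.items.any fun q => q.1 == x) = _
      rw [hitems, List.any_map]
      by_cases hmem : x ∈ S
      · simp only [hmem, decide_true]
        exact List.any_eq_true.mpr ⟨x, hmem, by simp⟩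
      · simp only [hmem, decide_false]
        apply List.any_eq_false.mpr
        intro p hp
        simp only [Function.comp_apply, beq_iff_eq]
        rintro rfl
        exact hmem hp
    have hSapp : PySem.Set.ofList ((M ++ [e]).map pvPage) = PySem.Set.add S x := by
      rw [PySem.Set.ofList_eq_foldl, List.map_append, List.foldl_append, hS,
          PySem.Set.ofList_eq_foldl]
      rfl
    have hfold : (M ++ [e]).foldl pvAStep PySem.Dict.empty = pvAStep d e := by
      rw [List.foldl_append]
      rfl
    have hJT_hit : pvJT (M ++ [e]) x = pvJT M x ++ [pvText e] := by
      unfold pvJT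
      rw [List.filter_append]
      simp [← hx]
    have hJT_miss : ∀ p, p ≠ x → pvJT (M ++ [e]) p = pvJT M p := by
      intro p hp
      unfold pvJT
      rw [List.filter_append]
      have hne : (pvPage e == p) = false :=
        beq_eq_false_iff_ne.mpr (fun hh => hp (hx ▸ hh).symm)
      simp [hne]
    have hstep : pvAStep d e
        = match d.get? x with
          | none => d.insert x (pvText e)
          | some v => d.insert x (v ++ " " ++ pvText e) := by
      show (if pvText e = "" then d else _) = _
      rw [if_neg he]
    rw [hfold, hSapp, hstep, hget]
    by_cases hmem : x ∈ S
    · rw [pvFindSelf S x hmem]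
      have hJTM : pvJT M x ≠ [] :=
        pvJT_ne_nil M x ((PySem.Set.mem_ofList _ _).mp (hS ▸ hmem))
      have hadd : PySem.Set.add S x = S := by
        unfold PySem.Set.add PySem.Set.contains
        rw [if_pos (by simpa [List.contains_iff_mem] using hmem)]
      rw [hadd]
      show (d.insert x (pvCat (pvJT M x) ++ " " ++ pvText e)).items = _
      unfold PySem.Dict.insert
      rw [if_pos (by rw [hcontains]; simpa using hmem), hitems, List.map_map]
      apply List.map_congr_left
      intro p _
      by_cases hpx : p = x
      · subst hpx
        simp only [Function.comp_apply, beq_self_eq_true, if_pos]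
        rw [hJT_hit, pvCat_append, if_neg hJTM]
      · have : (p == x) = false := beq_eq_false_iff_ne.mpr hpx
        simp only [Function.comp_apply, this, Bool.false_eq_true, if_false]
        rw [hJT_miss p hpx]
    · rw [pvFindNone S x hmem]
      have hadd : PySem.Set.add S x = S ++ [x] := by
        unfold PySem.Set.add PySem.Set.contains
        rw [if_neg (by simpa [List.contains_iff_mem] using hmem)]
      rw [hadd]
      show (d.insert x (pvText e)).items = _
      unfold PySem.Dict.insert
      rw [if_neg (by rw [hcontains]; simpa using hmem)]
      show d.items ++ [(x, pvText e)] = _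
      rw [hitems, List.map_append]
      congr 1
      · apply List.map_congr_left
        intro p hp
        have hpx : p ≠ x := fun hh => hmem (hh ▸ hp)
        rw [hJT_miss p hpx]
      · have hJTM : pvJT M x = [] :=
          pvJT_eq_nil M x (fun hh => hmem ((PySem.Set.mem_ofList _ _).mpr hh))
        rw [List.map_singleton, hJT_hit, hJTM, List.nil_append]
        rfl

-- B's inner comprehension collects exactly the page-p texts of the filtered list
lemma pvB_texts (c : List (List (String × String))) (p : String) :
    (c.filter (fun e => decide (pvPage e = p ∧ pvText e ≠ ""))).map pvText
      = pvJT (pvL c) p := by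
  unfold pvJT pvL
  rw [List.filter_filter]
  congr 1
  apply List.filter_congr
  intro e _
  by_cases h1 : pvPage e = p <;> by_cases h2 : pvText e = "" <;> simp [h1, h2]

-- ===== VERDICT (by name: the statement is the Claim_ definition above) =====
set_option maxHeartbeats 1000000 in
theorem merge_duplicate_pages_for_application_screenshots_bhutan_spec : Claim_equal_merge_duplicate_pages_for_application_screenshots_bhutan := by
  intro c _ _
  simp only [Spec_merge_duplicate_pages_for_application_screenshots_bhutan,
    merge_duplicate_pages_for_application_screenshots_bhutan,
    merge_duplicate_pages_for_application_screenshots_bhutan_alt, pvBPages]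
  rw [pvA_foldl_filter c PySem.Dict.empty]
  have hl : ∀ e ∈ pvL c, pvText e ≠ "" := by
    intro e he
    have := List.of_mem_filter he
    simpa using this
  rw [pvA_items (pvL c) hl, List.map_map]
  have hLfix : c.filter (fun e => decide (pvText e ≠ "")) = pvL c := rfl
  rw [hLfix]
  set S := PySem.Set.ofList ((pvL c).map pvPage) with hS
  apply PySem.List.sorted_eq_of_perm_of_pairwise_lt
  · -- the B output is a permutation of A's merged (unsorted) list
    have hfun : ∀ p : String,
        ([("text_on_page", p),
          ("text", PySem.Str.join " "
            ((c.filter (fun e => decide (pvPage e = p ∧ pvText e ≠ ""))).map pvText))])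
        = ((fun q : String × String => [("text_on_page", q.1), ("text", q.2)]) ∘
            (fun p => (p, pvCat (pvJT (pvL c) p)))) p := by
      intro p
      simp only [Function.comp_apply]
      rw [pvB_texts, pvJoin_eq_pvCat]
    rw [List.map_congr_left (fun p _ => hfun p), ← List.map_map, List.map_map]
    exact (PySem.List.sorted_perm S (fun x => x) false).map _
  · -- strictly increasing page keys
    rw [List.pairwise_map]
    have hkey : ∀ p v, PySem.Dict.getD (PySem.Dict.mk
        [("text_on_page", p), ("text", v)]) "text_on_page" "" = p := by
      intro p v
      rfl
    have hpair : List.Pairwise (fun a b : String => a ≤ b)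
        (PySem.List.sorted S (fun x => x) false) :=
      PySem.List.sorted_pairwise S (fun x => x)
    have hnodup : (PySem.List.sorted S (fun x => x) false).Nodup :=
      (PySem.List.sorted_perm S (fun x => x) false).nodup_iff.mpr (PySem.Set.nodup_ofList _)
    have := hpair.and hnodup
    refine this.imp ?_
    intro a b hab
    simp only [hkey]
    exact lt_of_le_of_ne hab.1 hab.2
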